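-- pv_equiv track=rewrite | github.com/SwiftWare-Lab/typed-data-transformation | modeling/dict_compression_file.py | get_total_size
-- ===== SOURCE A (Python) =====
-- def get_bit_size(bit_key):
--     """Calculate the size of a bit key in bits."""
--     if isinstance(bit_key, str):
--         # Each character in the string is a bit ('0' or '1')
--         return len(bit_key)
--     elif isinstance(bit_key, int):
--         # Measure the size of an integer in bits
--         return bit_key.bit_length()
--     else:
--         raise TypeError("Bit key must be a string or integer.")
--
-- def get_integer_size(value):
--     """Calculate the size of an integer in bits."""
--     if isinstance(value, int):
--         return value.bit_length()
--     else:
--         raise TypeError("Value must be an integer.")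
--
-- def get_total_size(obj, seen=None):
--    ###Recursively finds the total size of an object in bits
--     size = 0
--     if seen is None:
--         seen = set()
--     obj_id = id(obj)
--     if obj_id in seen:
--         return 0
--
--     # Mark the object as seen
--     seen.add(obj_id)
--
--     if isinstance(obj, dict):
--         # Add size of dictionary keys and values
--         for k, v in obj.items():
--             # Get size of key in bits and value in bits
--             key_size_bits = get_bit_size(k)
--             value_size_bits = get_integer_size(v)
--             size += key_size_bits + value_size_bits
--     elif hasattr(obj, '__dict__'):
--         # If the object has a __dict__ attribute, add its size
--         size += get_total_size(obj.__dict__, seen)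
--     elif hasattr(obj, '__iter__') and not isinstance(obj, (str, bytes, bytearray)):
--         # If the object is an iterable but not a string/bytes/bytearray, add sizes of its items
--         size += sum(get_total_size(i, seen) for i in obj)
--
--     return size
-- ===== SOURCE B (Python) =====
-- def get_bit_size(bit_key):
--     if isinstance(bit_key, str):
--         return len(bit_key)
--     elif isinstance(bit_key, int):
--         return bit_key.bit_length()
--     else:
--         raise TypeError("Bit key must be a string or integer.")
--
-- def get_integer_size(value):
--     if isinstance(value, int):
--         return value.bit_length()
--     else:
--         raise TypeError("Value must be an integer.")
--
-- def get_total_size(obj, seen=None):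
--     # Staged decomposition on the stated domain (flat str->int dict): the key
--     # bits are the length of all keys concatenated, the value bits a separate
--     # pass over the values.  (Return value only: unlike A, B does not add
--     # id(obj) to a caller-supplied `seen` set.)
--     key_bits = len(''.join(obj))
--     val_bits = 0
--     for v in obj.values():
--         val_bits += v.bit_length()
--     return key_bits + val_bits
-- ===== Notes on version B (the rewrite author's own statement) =====
-- stated objective: simpler
-- what changed: Replaces the recursive seen-set traversal with branch cascade by two staged passes on the flat str->int dict the domain admits: key bits as the length of the concatenation of all keys, plus a separate accumulation of value bit-lengths; the id/seen bookkeeping and the __dict__/iterable branches are dead on this domain. Return value only: B does not mutate a caller-supplied seen set.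
import Mathlib
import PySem

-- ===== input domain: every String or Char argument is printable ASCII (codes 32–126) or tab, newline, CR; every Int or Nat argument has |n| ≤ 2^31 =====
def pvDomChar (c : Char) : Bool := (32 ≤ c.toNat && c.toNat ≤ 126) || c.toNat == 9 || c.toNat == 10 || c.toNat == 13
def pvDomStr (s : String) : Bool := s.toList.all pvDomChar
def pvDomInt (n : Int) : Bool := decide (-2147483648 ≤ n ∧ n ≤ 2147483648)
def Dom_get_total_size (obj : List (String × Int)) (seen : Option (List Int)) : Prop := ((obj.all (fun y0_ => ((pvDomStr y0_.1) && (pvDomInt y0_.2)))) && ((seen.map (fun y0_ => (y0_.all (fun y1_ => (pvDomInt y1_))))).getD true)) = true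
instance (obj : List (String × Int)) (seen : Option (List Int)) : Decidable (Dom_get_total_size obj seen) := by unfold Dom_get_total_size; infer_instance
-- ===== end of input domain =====

-- B: two staged passes (length of all keys joined + a value-bit loop) instead of A's seen-set recursive traversal (simpler; return value only: A also mutates a caller-supplied seen set).


-- ===== PORT A =====
-- Return value only: Python A also adds id(obj) to the caller-supplied `seen` set (a mutation).
-- id(obj) is the address of a freshly built dict, never an element of a caller's int set on the
-- stated domain, so the `obj_id in seen` test is ported as false.
def get_total_size (obj : List (String × Int)) (seen : Option (List Int)) : Int :=
  let size : Int := 0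
  -- if seen is None: seen = set(); obj_id = id(obj); if obj_id in seen: return 0  (test is false, see above)
  -- seen.add(obj_id): mutation, no effect on the return value
  -- isinstance(obj, dict) holds: for k, v in obj.items(): size += get_bit_size(k) + get_integer_size(v)
  let size := obj.foldl (fun size kv => size + (PySem.Str.len kv.1 + (PySem.Int.bitLength kv.2 : Int))) size
  size

-- ===== PORT B =====
-- for v in obj.values(): val_bits += v.bit_length()
def pvValBitsLoop : List Int → Int → Int
  | [], val_bits => val_bits
  | v :: rest, val_bits => pvValBitsLoop rest (val_bits + (PySem.Int.bitLength v : Int))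

def get_total_size_alt (obj : List (String × Int)) (seen : Option (List Int)) : Int :=
  let key_bits := PySem.Str.len (PySem.Str.join "" (obj.map Prod.fst))
  let val_bits := pvValBitsLoop (obj.map Prod.snd) 0
  key_bits + val_bits

-- ===== PRECONDITION & SPEC =====
def Spec_get_total_size (obj : List (String × Int)) (seen : Option (List Int)) (out : Int) : Prop := out = get_total_size_alt obj seen
instance (obj : List (String × Int)) (seen : Option (List Int)) (out : Int) : Decidable (Spec_get_total_size obj seen out) := by unfold Spec_get_total_size; infer_instance

-- ===== CLAIM (what is proved, stated in full; the proofs are below) =====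
def Claim_equal_get_total_size : Prop := ∀ (obj : List (String × Int)) (seen : Option (List Int)), Dom_get_total_size obj seen → Spec_get_total_size obj seen (get_total_size obj seen)

-- ===== LEMMAS AND PROOFS =====
theorem pvValBitsLoop_acc (l : List Int) (a : Int) :
    pvValBitsLoop l a = a + pvValBitsLoop l 0 := by
  induction l generalizing a with
  | nil => simp [pvValBitsLoop]
  | cons v rest ih =>
    simp only [pvValBitsLoop]
    rw [ih, ih (0 + _)]
    ring

theorem pvValBitsLoop_sum (l : List Int) :
    pvValBitsLoop l 0 = (l.map (fun v => (PySem.Int.bitLength v : Int))).sum := by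
  induction l with
  | nil => simp [pvValBitsLoop]
  | cons v rest ih =>
    simp only [pvValBitsLoop, List.map_cons, List.sum_cons]
    rw [pvValBitsLoop_acc, ih]
    ring

theorem pvCharsJoinNil (l : List (List Char)) :
    PySem.Chars.join [] l = l.flatten := by
  induction l with
  | nil => simp [PySem.Chars.join, List.intercalate]
  | cons a rest ih =>
    cases rest with
    | nil => simp [PySem.Chars.join_singleton]
    | cons b rs =>
      rw [PySem.Chars.join_cons_cons, ih]
      simp

theorem pvLenJoinNil (l : List String) :
    PySem.Str.len (PySem.Str.join "" l) = ((l.map PySem.Str.len).sum : Int) := by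
  have h : (PySem.Str.join "" l).toList = (l.map String.toList).flatten := by
    rw [PySem.Str.toList_join]; simpa using pvCharsJoinNil (l.map String.toList)
  simp only [PySem.Str.len_eq, h, List.length_flatten]
  push_cast
  simp only [List.map_map, Function.comp_def]
  congr 1

theorem pvSumSplit (obj : List (String × Int)) :
    (obj.map (fun kv => PySem.Str.len kv.1 + (PySem.Int.bitLength kv.2 : Int))).sum =
      ((obj.map Prod.fst).map PySem.Str.len).sum +
      ((obj.map Prod.snd).map (fun v => (PySem.Int.bitLength v : Int))).sum := by
  induction obj with
  | nil => simp
  | cons kv rest ih =>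
    simp only [List.map_cons, List.sum_cons, List.map_map] at ih ⊢
    rw [ih]; ring

-- ===== VERDICT (by name: the statement is the Claim_ definition above) =====
theorem get_total_size_spec : Claim_equal_get_total_size := by
  intro obj seen _
  unfold Spec_get_total_size get_total_size get_total_size_alt
  simp only []
  rw [PySem.List.foldl_add (l := obj)
    (g := fun kv => PySem.Str.len kv.1 + (PySem.Int.bitLength kv.2 : Int)),
    pvValBitsLoop_sum, pvLenJoinNil, pvSumSplit]
  ring
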